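-- pv_equiv track=rewrite | github.com/k0b3n4irb/opensnes | tools/memprofiler/memprofiler.py | categorize_symbol
-- ===== SOURCE A (Python) =====
-- def categorize_symbol(name):
--     name_lower = name.lower()
--     if any(x in name_lower for x in ['oam', 'sprite']): return 'Sprites'
--     if any(x in name_lower for x in ['tile', 'gfx', 'chr', 'vram']): return 'Graphics'
--     if any(x in name_lower for x in ['pad', 'joy', 'input', 'key']): return 'Input'
--     if any(x in name_lower for x in ['audio', 'sound', 'music']): return 'Audio'
--     if name.startswith('_') or name.startswith('.'): return 'Runtime'
--     return 'User Code'
-- ===== SOURCE B (Python) =====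
-- KEYWORD_PRIORITY = {
--     'oam': 0, 'sprite': 0,
--     'tile': 1, 'gfx': 1, 'chr': 1, 'vram': 1,
--     'pad': 2, 'joy': 2, 'input': 2, 'key': 2,
--     'audio': 3, 'sound': 3, 'music': 3,
-- }
-- CATEGORY_BY_PRIORITY = ['Sprites', 'Graphics', 'Input', 'Audio']
--
-- def categorize_symbol(name):
--     name_lower = name.lower()
--     best = None
--     for kw, prio in KEYWORD_PRIORITY.items():
--         if kw in name_lower and (best is None or prio < best):
--             best = prio
--     if best is not None:
--         return CATEGORY_BY_PRIORITY[best]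
--     if name.startswith('_') or name.startswith('.'):
--         return 'Runtime'
--     return 'User Code'
-- ===== Notes on version B (the rewrite author's own statement) =====
-- stated objective: alternative
-- what changed: Instead of four sequential short-circuit category branches, B flattens all keywords into one keyword-to-priority map, makes a single pass computing the minimum priority among matching keywords, and indexes a category array with it; the startswith guard and default remain after the scan.
import Mathlib
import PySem

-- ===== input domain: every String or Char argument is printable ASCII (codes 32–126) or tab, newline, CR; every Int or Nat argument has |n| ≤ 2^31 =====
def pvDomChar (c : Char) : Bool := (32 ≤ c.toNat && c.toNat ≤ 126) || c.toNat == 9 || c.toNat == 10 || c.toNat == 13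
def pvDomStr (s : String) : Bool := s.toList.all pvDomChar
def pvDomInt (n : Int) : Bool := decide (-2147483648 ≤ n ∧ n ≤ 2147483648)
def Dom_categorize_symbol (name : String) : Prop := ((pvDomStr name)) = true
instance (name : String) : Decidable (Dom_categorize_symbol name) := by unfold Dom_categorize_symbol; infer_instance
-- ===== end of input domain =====

-- B replaces A's four sequential category branches with one pass over a flat keyword->priority map computing the minimum matching priority, then an array lookup (alternative decomposition, same cost).


-- ===== PORT A =====
def categorize_symbol (name : String) : String :=
  let name_lower := PySem.Str.lower name
  if (["oam", "sprite"] : List String).any (fun x => PySem.Str.isIn x name_lower) then "Sprites"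
  else if (["tile", "gfx", "chr", "vram"] : List String).any (fun x => PySem.Str.isIn x name_lower) then "Graphics"
  else if (["pad", "joy", "input", "key"] : List String).any (fun x => PySem.Str.isIn x name_lower) then "Input"
  else if (["audio", "sound", "music"] : List String).any (fun x => PySem.Str.isIn x name_lower) then "Audio"
  else if PySem.Str.startswith name "_" || PySem.Str.startswith name "." then "Runtime"
  else "User Code"

-- ===== PORT B =====
-- KEYWORD_PRIORITY (a dict with distinct literal keys, iterated in insertion order)
def kwPriority : List (String × Int) :=
  [("oam", 0), ("sprite", 0),
   ("tile", 1), ("gfx", 1), ("chr", 1), ("vram", 1),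
   ("pad", 2), ("joy", 2), ("input", 2), ("key", 2),
   ("audio", 3), ("sound", 3), ("music", 3)]

def catByPriority : List String := ["Sprites", "Graphics", "Input", "Audio"]

def categorize_symbol_alt (name : String) : String :=
  let name_lower := PySem.Str.lower name
  let best : Option Int := kwPriority.foldl
    (fun best kp =>
      if PySem.Str.isIn kp.1 name_lower &&
         (match best with | none => true | some b => decide (kp.2 < b)) then some kp.2
      else best) none
  match best with
  | some p => (PySem.List.pyGet? catByPriority p).getD ""  -- p is always 0..3, so the index is in range and the default is unreachable
  | none =>
    if PySem.Str.startswith name "_" || PySem.Str.startswith name "." then "Runtime"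
    else "User Code"

-- ===== PRECONDITION & SPEC =====
def Spec_categorize_symbol (name : String) (out : String) : Prop := out = categorize_symbol_alt name
instance (name : String) (out : String) : Decidable (Spec_categorize_symbol name out) := by unfold Spec_categorize_symbol; infer_instance

-- ===== CLAIM (what is proved, stated in full; the proofs are below) =====
def Claim_equal_categorize_symbol : Prop := ∀ (name : String), Dom_categorize_symbol name → Spec_categorize_symbol name (categorize_symbol name)

-- ===== LEMMAS AND PROOFS =====

-- the priority of the first keyword of the table that occurs in nl (proof-side characterisation)
def pvFirst (nl : String) : List (String × Int) → Option Int
  | [] => none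
  | (k, p) :: rest => if PySem.Str.isIn k nl then some p else pvFirst nl rest

-- zeta-reduced reading of port A (definitional)
theorem pvA_eq (name : String) : categorize_symbol name =
    (if (["oam", "sprite"] : List String).any (fun x => PySem.Str.isIn x (PySem.Str.lower name)) then "Sprites"
     else if (["tile", "gfx", "chr", "vram"] : List String).any (fun x => PySem.Str.isIn x (PySem.Str.lower name)) then "Graphics"
     else if (["pad", "joy", "input", "key"] : List String).any (fun x => PySem.Str.isIn x (PySem.Str.lower name)) then "Input"
     else if (["audio", "sound", "music"] : List String).any (fun x => PySem.Str.isIn x (PySem.Str.lower name)) then "Audio"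
     else if PySem.Str.startswith name "_" || PySem.Str.startswith name "." then "Runtime"
     else "User Code") := rfl

-- zeta-reduced reading of port B (definitional)
theorem pvB_eq (name : String) : categorize_symbol_alt name =
    (match kwPriority.foldl
        (fun best kp =>
          if PySem.Str.isIn kp.1 (PySem.Str.lower name) &&
             (match best with | none => true | some b => decide (kp.2 < b)) then some kp.2
          else best) none with
     | some p => (PySem.List.pyGet? catByPriority p).getD ""
     | none =>
       if PySem.Str.startswith name "_" || PySem.Str.startswith name "." then "Runtime"
       else "User Code") := rfl

-- once the accumulator holds a priority no later entry can beat, the fold leaves it unchanged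
theorem pvFold_some (nl : String) (l : List (String × Int)) (a : Int)
    (h : ∀ kp ∈ l, a ≤ kp.2) :
    l.foldl (fun best kp =>
      if PySem.Str.isIn kp.1 nl &&
         (match best with | none => true | some b => decide (kp.2 < b)) then some kp.2
      else best) (some a) = some a := by
  induction l with
  | nil => rfl
  | cons kp rest ih =>
    have ha : a ≤ kp.2 := h kp (List.mem_cons_self ..)
    have hd : (decide (kp.2 < a)) = false := decide_eq_false (by omega)
    rw [List.foldl_cons]
    simp only [hd, Bool.and_false, Bool.false_eq_true, if_false]
    exact ih (fun x hx => h x (List.mem_cons_of_mem _ hx))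

-- on a table whose priorities are nondecreasing, the min-fold returns the first match
theorem pvFold_none (nl : String) (l : List (String × Int))
    (hs : l.Pairwise (fun x y => x.2 ≤ y.2)) :
    l.foldl (fun best kp =>
      if PySem.Str.isIn kp.1 nl &&
         (match best with | none => true | some b => decide (kp.2 < b)) then some kp.2
      else best) none = pvFirst nl l := by
  induction l with
  | nil => rfl
  | cons kp rest ih =>
    rcases List.pairwise_cons.mp hs with ⟨hhead, htail⟩
    rw [List.foldl_cons, pvFirst]
    by_cases hin : PySem.Str.isIn kp.1 nl = true
    · simp only [hin, Bool.and_true, if_true]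
      exact pvFold_some nl rest kp.2 hhead
    · simp only [Bool.not_eq_true] at hin
      simp only [hin, Bool.false_and, Bool.false_eq_true, if_false]
      exact ih htail

-- ===== VERDICT (by name: the statement is the Claim_ definition above) =====
theorem categorize_symbol_spec : Claim_equal_categorize_symbol := by
  intro name _
  unfold Spec_categorize_symbol
  rw [pvA_eq, pvB_eq, pvFold_none (PySem.Str.lower name) kwPriority (by unfold kwPriority; decide)]
  unfold kwPriority
  simp only [List.any_cons, List.any_nil, Bool.or_false, pvFirst]
  generalize PySem.Str.isIn "oam" (PySem.Str.lower name) = b1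
  generalize PySem.Str.isIn "sprite" (PySem.Str.lower name) = b2
  generalize PySem.Str.isIn "tile" (PySem.Str.lower name) = b3
  generalize PySem.Str.isIn "gfx" (PySem.Str.lower name) = b4
  generalize PySem.Str.isIn "chr" (PySem.Str.lower name) = b5
  generalize PySem.Str.isIn "vram" (PySem.Str.lower name) = b6
  generalize PySem.Str.isIn "pad" (PySem.Str.lower name) = b7
  generalize PySem.Str.isIn "joy" (PySem.Str.lower name) = b8
  generalize PySem.Str.isIn "input" (PySem.Str.lower name) = b9
  generalize PySem.Str.isIn "key" (PySem.Str.lower name) = b10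
  generalize PySem.Str.isIn "audio" (PySem.Str.lower name) = b11
  generalize PySem.Str.isIn "sound" (PySem.Str.lower name) = b12
  generalize PySem.Str.isIn "music" (PySem.Str.lower name) = b13
  generalize PySem.Str.startswith name "_" = c1
  generalize PySem.Str.startswith name "." = c2
  revert b1 b2 b3 b4 b5 b6 b7 b8 b9 b10 b11 b12 b13 c1 c2
  decide
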